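-- pv_equiv track=rewrite | github.com/Axeuh/opencode-qq-bot | src/core/command/utils.py | match_model_by_input
-- ===== SOURCE A (Python) =====
-- from typing import Tuple, Optional, Any, List, Dict
--
-- def match_model_by_input(
--     models: List[str],
--     model_input: str
-- ) -> Optional[str]:
--     """根据用户输入匹配模型
--
--     Args:
--         models: 模型列表
--         model_input: 用户输入（序号或名称）
--
--     Returns:
--         匹配的模型名称或 None
--     """
--     if not models:
--         return None
--
--     # 检查是否为序号
--     if model_input.isdigit():
--         index = int(model_input)
--         if 1 <= index <= len(models):
--             return models[index - 1]
--         return None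
--
--     # 精确匹配
--     if model_input in models:
--         return model_input
--
--     # 不区分大小写匹配
--     for m in models:
--         if m.lower() == model_input.lower():
--             return m
--
--     # 匹配模型名称的最后一部分
--     for m in models:
--         parts = m.split("/")
--         if len(parts) >= 2 and parts[-1].lower() == model_input.lower():
--             return m
--
--     return None
-- ===== SOURCE B (Python) =====
-- def match_model_by_input(models, model_input):
--     if not models:
--         return None
--     if model_input.isdigit():
--         index = int(model_input)
--         if 1 <= index <= len(models):
--             return models[index - 1]
--         return None
--     target = model_input.lower()
--     exact = False
--     ci = None
--     suffix = None
--     for m in models: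
--         if m == model_input:
--             exact = True
--         if ci is None and m.lower() == target:
--             ci = m
--         if suffix is None:
--             parts = m.split("/")
--             if len(parts) >= 2 and parts[-1].lower() == target:
--                 suffix = m
--     if exact:
--         return model_input
--     if ci is not None:
--         return ci
--     return suffix
-- ===== Notes on version B (the rewrite author's own statement) =====
-- stated objective: alternative
-- what changed: Replaces A's three priority-ordered scans (exact membership, case-insensitive loop, suffix loop) with a single pass over models carrying tiered state (exact flag, first case-insensitive match, first suffix match) resolved after the loop, with model_input.lower() hoisted out of the loop.
import Mathlib
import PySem

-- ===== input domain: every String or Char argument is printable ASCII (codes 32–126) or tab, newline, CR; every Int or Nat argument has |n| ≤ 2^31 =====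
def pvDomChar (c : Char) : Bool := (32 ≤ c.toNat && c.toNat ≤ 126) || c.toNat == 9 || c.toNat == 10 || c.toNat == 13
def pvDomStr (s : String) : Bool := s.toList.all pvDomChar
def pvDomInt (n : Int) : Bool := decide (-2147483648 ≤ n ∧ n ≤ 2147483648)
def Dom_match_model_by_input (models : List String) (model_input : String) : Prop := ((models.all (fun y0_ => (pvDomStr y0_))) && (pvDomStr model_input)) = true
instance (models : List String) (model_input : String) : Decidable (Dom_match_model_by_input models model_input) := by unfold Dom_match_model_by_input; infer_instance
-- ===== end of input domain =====

-- B replaces A's three priority-ordered scans with one pass carrying tiered state (alternative decomposition, same cost).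


-- ===== PORT A =====
-- predicate of A's suffix loop body: parts = m.split("/"); len(parts) >= 2 and parts[-1].lower() == model_input.lower()
def aSuffixHit (target m : String) : Bool :=
  match PySem.Str.split? m "/" with
  | some parts =>
      decide (2 ≤ parts.length) &&
        (match PySem.List.pyGet? parts (-1) with
         | some last => PySem.Str.lower last == target
         | none => false)
  | none => false  -- unreachable: the separator "/" is nonempty

def match_model_by_input (models : List String) (model_input : String) : Option String :=
  if models = [] then none
  else if PySem.Str.strIsdigit model_input then
    match PySem.Int.ofStr? model_input with
    | some index =>
        if 1 ≤ index ∧ index ≤ (models.length : Int) then PySem.List.pyGet? models (index - 1)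
        else none
    | none => none  -- unreachable: isdigit guarantees int() succeeds
  else if models.any (fun m => m == model_input) then some model_input
  else
    match models.find? (fun m => PySem.Str.lower m == PySem.Str.lower model_input) with
    | some m => some m
    | none => models.find? (fun m => aSuffixHit (PySem.Str.lower model_input) m)

-- ===== PORT B =====
-- one step of B's single loop over models, threading (exact, ci, suffix)
def bStep (model_input target : String) (st : Bool × Option String × Option String)
    (m : String) : Bool × Option String × Option String :=
  ( st.1 || (m == model_input),
    match st.2.1 with
    | some c => some c
    | none => if PySem.Str.lower m == target then some m else none,
    match st.2.2 with
    | some s => some s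
    | none => if aSuffixHit target m then some m else none )

def match_model_by_input_alt (models : List String) (model_input : String) : Option String :=
  if models = [] then none
  else if PySem.Str.strIsdigit model_input then
    match PySem.Int.ofStr? model_input with
    | some index =>
        if 1 ≤ index ∧ index ≤ (models.length : Int) then PySem.List.pyGet? models (index - 1)
        else none
    | none => none  -- unreachable: isdigit guarantees int() succeeds
  else
    let target := PySem.Str.lower model_input
    let res := models.foldl (bStep model_input target) (false, none, none)
    if res.1 then some model_input
    else
      match res.2.1 with
      | some c => some c
      | none => res.2.2

-- ===== PRECONDITION & SPEC =====
def Spec_match_model_by_input (models : List String) (model_input : String) (out : Option String) : Prop := out = match_model_by_input_alt models model_input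
instance (models : List String) (model_input : String) (out : Option String) : Decidable (Spec_match_model_by_input models model_input out) := by unfold Spec_match_model_by_input; infer_instance

-- ===== CLAIM (what is proved, stated in full; the proofs are below) =====
def Claim_equal_match_model_by_input : Prop := ∀ (models : List String) (model_input : String), Dom_match_model_by_input models model_input → Spec_match_model_by_input models model_input (match_model_by_input models model_input)

-- ===== LEMMAS AND PROOFS =====

-- B's fold computes: exact = any exact hit, ci = first case-insensitive hit, suffix = first suffix hit
theorem bStep_foldl (model_input target : String) (ms : List String)
    (e : Bool) (c s : Option String) :
    ms.foldl (bStep model_input target) (e, c, s) =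
      (e || ms.any (fun m => m == model_input),
       c.or (ms.find? (fun m => PySem.Str.lower m == target)),
       s.or (ms.find? (fun m => aSuffixHit target m))) := by
  induction ms generalizing e c s with
  | nil => simp
  | cons m ms ih =>
    simp only [List.foldl_cons, List.any_cons, List.find?_cons]
    cases c <;> cases s <;>
      simp only [bStep] <;>
      cases hp : (PySem.Str.lower m == target) <;>
      cases hq : aSuffixHit target m <;>
      simp [ih, Bool.or_assoc]

-- ===== VERDICT (by name: the statement is the Claim_ definition above) =====
theorem match_model_by_input_spec : Claim_equal_match_model_by_input := by
  intro models model_input _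
  unfold Spec_match_model_by_input match_model_by_input match_model_by_input_alt
  by_cases h0 : models = []
  · rw [if_pos h0, if_pos h0]
  · rw [if_neg h0, if_neg h0]
    by_cases h1 : PySem.Str.strIsdigit model_input = true
    · rw [if_pos h1, if_pos h1]
    · rw [if_neg h1, if_neg h1]
      simp only [bStep_foldl, Bool.false_or, Option.none_or]
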